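-- pv_equiv track=rewrite | github.com/JaidenAtterbury/CSE-160 | Exams/final_22au.py | search_item
-- ===== SOURCE A (Python) =====
-- def search_item(inventory, search_terms, num_match):
--     """
--     Arguments:
--         inventory (dict): a dictionary where each key is an item (string)
--         and each value is a list of (string) descriptive terms that apply to
--         the item.
--         search_terms (list): a list of strings representing the descriptive
--         terms being searched for
--         num_match (integer): the number of descriptive terms from search_terms
--         that need to be in an item's list of descriptive terms before that item
--         would be returned.
--
--     Returns:
--         an alphabetically sorted list of items who have at least num_match
--         terms from search_terms in their list of descriptive terms.
--     """
--     # For each of the items in the inventory, loop through the search terms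
--     # and count the number of matching words. If the number of similar words
--     # is less than or equal to the number of required matches, add this item
--     # to the list of matches. At the end return this list of matches.
--     match_list = []
--     for item, description in inventory.items():
--         num_same = 0
--         for search in search_terms:
--             if search in description:
--                 num_same += 1
--         if num_same >= num_match:
--             match_list.append(item)
--     return match_list
-- ===== SOURCE B (Python) =====
-- def search_item(inventory, search_terms, num_match):
--     # Inverted index: map each descriptive term to the items carrying it,
--     # then tally matches per item by direct index lookup (no per-item scan
--     # of descriptions against each search term).
--     index = {}
--     for item, description in inventory.items():
--         for term in set(description):
--             index.setdefault(term, []).append(item)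
--     counts = {}
--     for search in search_terms:
--         for item in index.get(search, []):
--             counts[item] = counts.get(item, 0) + 1
--     return [item for item in inventory if counts.get(item, 0) >= num_match]
-- ===== Notes on version B (the rewrite author's own statement) =====
-- stated objective: faster
-- what changed: B builds an inverted index term->items in one pass over the inventory, tallies per-item match counts by direct index lookups for each search term, and filters the inventory keys by the tabulated count, replacing A's nested scan that tests every search term against every description list.
import Mathlib
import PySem

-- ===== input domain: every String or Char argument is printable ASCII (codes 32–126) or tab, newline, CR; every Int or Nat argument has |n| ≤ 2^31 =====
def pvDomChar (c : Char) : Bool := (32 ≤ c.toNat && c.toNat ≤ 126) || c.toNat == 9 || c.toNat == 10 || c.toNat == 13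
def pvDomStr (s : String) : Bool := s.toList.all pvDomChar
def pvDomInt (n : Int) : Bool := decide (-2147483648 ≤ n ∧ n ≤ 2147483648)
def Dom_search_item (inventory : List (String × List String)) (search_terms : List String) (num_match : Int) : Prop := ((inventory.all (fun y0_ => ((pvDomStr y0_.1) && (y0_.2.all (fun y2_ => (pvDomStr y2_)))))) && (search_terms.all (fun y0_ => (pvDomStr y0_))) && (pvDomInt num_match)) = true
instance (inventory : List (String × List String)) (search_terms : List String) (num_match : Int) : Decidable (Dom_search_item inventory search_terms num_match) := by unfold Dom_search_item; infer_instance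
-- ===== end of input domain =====

-- B replaces A's per-item scan of every search term against every description with an
-- inverted index term->items built in one pass, per-term count tallies by index lookup,
-- and a final filter of the inventory keys; objective: faster on many items/terms.


-- ===== PORT A =====
def search_item (inventory : List (String × List String)) (search_terms : List String) (num_match : Int) : List String :=
  inventory.foldl (fun match_list p =>
    let num_same : Int :=
      search_terms.foldl (fun n search => if p.2.contains search then n + 1 else n) 0
    if num_match ≤ num_same then match_list ++ [p.1] else match_list) []

-- ===== PORT B =====
def search_item_alt (inventory : List (String × List String)) (search_terms : List String) (num_match : Int) : List String :=
  let index : PySem.Dict String (List String) :=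
    inventory.foldl (fun d p =>
      (PySem.Set.ofList p.2).foldl (fun d term => d.modify term [] (fun l => l ++ [p.1])) d)
      PySem.Dict.empty
  let counts : PySem.Dict String Int :=
    search_terms.foldl (fun d search =>
      (index.getD search []).foldl (fun d item => d.insert item (d.getD item 0 + 1)) d)
      PySem.Dict.empty
  (inventory.map Prod.fst).filter (fun item => num_match ≤ counts.getD item 0)

-- ===== PRECONDITION & SPEC =====
-- Pre_ excludes association lists with duplicate item keys: those do not represent any
-- Python dict (A's 'inventory' parameter is a dict, whose keys are necessarily unique).
def Pre_search_item (inventory : List (String × List String)) (search_terms : List String) (num_match : Int) : Prop :=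
  (inventory.map Prod.fst).Nodup
instance (inventory : List (String × List String)) (search_terms : List String) (num_match : Int) : Decidable (Pre_search_item inventory search_terms num_match) := by unfold Pre_search_item; infer_instance
def pvWitness_search_item : (List (String × List String)) × List String × Int :=
  ([("apple", ["red", "fruit"]), ("sky", ["blue"])], ["red", "blue"], 1)
def Spec_search_item (inventory : List (String × List String)) (search_terms : List String) (num_match : Int) (out : List String) : Prop := out = search_item_alt inventory search_terms num_match
instance (inventory : List (String × List String)) (search_terms : List String) (num_match : Int) (out : List String) : Decidable (Spec_search_item inventory search_terms num_match out) := by unfold Spec_search_item; infer_instance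

-- ===== CLAIM (what is proved, stated in full; the proofs are below) =====
def Claim_equal_search_item : Prop := ∀ (inventory : List (String × List String)) (search_terms : List String) (num_match : Int), Dom_search_item inventory search_terms num_match → Pre_search_item inventory search_terms num_match → Spec_search_item inventory search_terms num_match (search_item inventory search_terms num_match)

-- ===== LEMMAS AND PROOFS =====

-- A nodup list filtered for equality with s is [s] if present, [] otherwise.
lemma filter_beq_nodup (l : List String) (hnd : l.Nodup) (s : String) :
    l.filter (fun t => t == s) = if s ∈ l then [s] else [] := by
  rw [List.filter_beq]
  by_cases h : s ∈ l
  · rw [if_pos h, List.count_eq_one_of_mem hnd h, List.replicate_one]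
  · rw [if_neg h, List.count_eq_zero_of_not_mem h, List.replicate_zero]

-- One inventory entry's pass over its (deduplicated) terms appends its item to exactly
-- the buckets of the terms its description contains.
lemma index_entry_step (desc : List String) (item : String)
    (d : PySem.Dict String (List String)) (s : String) :
    ((PySem.Set.ofList desc).foldl (fun d t => d.modify t [] (fun l => l ++ [item])) d).getD s []
      = d.getD s [] ++ (if s ∈ desc then [item] else []) := by
  have h : (PySem.Set.ofList desc).foldl (fun d t => d.modify t [] (fun l => l ++ [item])) d
      = ((PySem.Set.ofList desc).map (fun t => (t, item))).foldl
          (fun d p => d.modify p.1 [] (fun l => l ++ [p.2])) d := by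
    rw [List.foldl_map]
  rw [h, PySem.Dict.getD_foldl_modify_append, List.filter_map]
  have hf : ((PySem.Set.ofList desc).filter ((fun p : String × String => p.1 == s) ∘ (fun t => (t, item))))
      = (PySem.Set.ofList desc).filter (fun t => t == s) := rfl
  rw [hf, filter_beq_nodup _ (PySem.Set.nodup_ofList desc) s]
  by_cases hm : s ∈ desc
  · simp [hm, PySem.Set.mem_ofList]
  · simp [hm, PySem.Set.mem_ofList]

-- B's whole index: the bucket of s lists, in inventory order, the items whose
-- description contains s.
lemma index_bucket (inv : List (String × List String)) (s : String) :
    ∀ d : PySem.Dict String (List String),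
    (inv.foldl (fun d p =>
        (PySem.Set.ofList p.2).foldl (fun d t => d.modify t [] (fun l => l ++ [p.1])) d) d).getD s []
      = d.getD s [] ++ inv.flatMap (fun p => if s ∈ p.2 then [p.1] else []) := by
  induction inv with
  | nil => intro d; simp
  | cons q rest ih =>
    intro d
    simp only [List.foldl_cons, List.flatMap_cons]
    rw [ih, index_entry_step, List.append_assoc]

-- In the bucket of s, an item with unique key occurs once iff its description contains s.
lemma bucket_count (inv : List (String × List String))
    (hnd : (inv.map Prod.fst).Nodup) (item : String) (desc : List String)
    (hmem : (item, desc) ∈ inv) (s : String) :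
    (inv.flatMap (fun p => if s ∈ p.2 then [p.1] else [])).count item
      = if s ∈ desc then 1 else 0 := by
  induction inv with
  | nil => simp at hmem
  | cons q rest ih =>
    simp only [List.map_cons, List.nodup_cons] at hnd
    simp only [List.flatMap_cons, List.count_append]
    rcases List.mem_cons.mp hmem with h | h
    · have habs : item ∉ rest.map Prod.fst := by rw [← h] at hnd; exact hnd.1
      have hrest : (rest.flatMap (fun p => if s ∈ p.2 then [p.1] else [])).count item = 0 := by
        rw [List.count_eq_zero]
        intro hc
        rcases List.mem_flatMap.mp hc with ⟨p, hp, hip⟩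
        have : item = p.1 := by
          by_cases hs : s ∈ p.2 <;> simp [hs] at hip; exact hip
        exact habs (List.mem_map.mpr ⟨p, hp, this.symm⟩)
      rw [hrest, ← h]
      by_cases hs : s ∈ desc <;> simp [hs]
    · have hne : item ≠ q.1 := by
        intro he
        exact hnd.1 (he ▸ (List.mem_map.mpr ⟨(item, desc), h, rfl⟩))
      have hhead : (if s ∈ q.2 then [q.1] else []).count item = 0 := by
        by_cases hs : s ∈ q.2
        · simp only [hs, if_true, List.count_singleton']
          exact if_neg (fun he => hne (Eq.symm he))
        · simp [hs]
      rw [hhead, ih hnd.2 h]; ring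

-- B's tally loop: each item's final count is the number of search terms (with
-- multiplicity) whose bucket lists it, i.e. that its description contains.
lemma counts_spec (terms : List String) (inv : List (String × List String))
    (hnd : (inv.map Prod.fst).Nodup) (item : String) (desc : List String)
    (hmem : (item, desc) ∈ inv) :
    ∀ d : PySem.Dict String Int,
    (terms.foldl (fun d s =>
        ((inv.foldl (fun d p =>
            (PySem.Set.ofList p.2).foldl (fun d t => d.modify t [] (fun l => l ++ [p.1])) d)
          PySem.Dict.empty).getD s []).foldl
          (fun d i => d.insert i (d.getD i 0 + 1)) d) d).getD item 0
      = d.getD item 0 + (terms.countP (fun s => desc.contains s) : Int) := by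
  induction terms with
  | nil => intro d; simp
  | cons t ts ih =>
    intro d
    simp only [List.foldl_cons]
    rw [ih, PySem.Dict.getD_foldl_insert_add_one, index_bucket]
    simp only [PySem.Dict.getD_empty, List.nil_append]
    rw [bucket_count inv hnd item desc hmem t, List.countP_cons]
    by_cases hs : t ∈ desc
    · have hc : desc.contains t = true := List.elem_eq_true_of_mem hs
      rw [if_pos hs]; simp only [hc, if_true]
      push_cast; ring
    · have hc : desc.contains t = false := by
        simpa using hs
      rw [if_neg hs, hc]
      push_cast; ring

-- ===== VERDICT (by name: the statement is the Claim_ definition above) =====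
theorem search_item_spec : Claim_equal_search_item := by
  intro inv terms nm _ hpre
  unfold Spec_search_item
  simp only [search_item, search_item_alt, PySem.List.foldl_count_if]
  have hA := PySem.List.foldl_append_if
      (fun p : String × List String => decide (nm ≤ (0:Int) + ((terms.countP (fun s => p.2.contains s) : Nat) : Int)))
      Prod.fst inv []
  simp only [decide_eq_true_eq, List.nil_append] at hA
  rw [hA, List.filter_map]
  apply congrArg (List.map Prod.fst)
  apply List.filter_congr
  intro p hp
  have h := counts_spec terms inv hpre p.1 p.2 hp PySem.Dict.empty
  simp only [PySem.Dict.getD_empty, zero_add] at h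
  simp only [Function.comp_apply, zero_add, h]
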